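-- pv_equiv track=rewrite | github.com/5hyun/python_codingTest | 프로그래머스/크레인인형뽑기게임.py | solution
-- ===== SOURCE A (Python) =====
-- def solution(board, moves):
--     answer = 0
--     rst = []#오른쪽 바구니
--     game = []
--
--     for i in range(len(board)):
--         game.append([])
--         for j in range(len(board)):
--             game[i].append(board[len(board)-1-j][i])
--
--     remove_set = {0}
--     for i in range(len(game)):
--         game[i] = [i for i in game[i] if i not in remove_set]
--     for i in moves:
--         if game[i-1]:
--             t = game[i-1].pop()
--             if rst and rst[-1] == t:
--                 rst.pop()
--                 answer += 2
--             else: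
--                 rst.append(t)
--     return answer
-- ===== SOURCE B (Python) =====
-- def solution(board, moves):
--     n = len(board)
--     grid = [row[:] for row in board]
--     answer = 0
--     basket = []
--     for m in moves:
--         c = m - 1
--         for r in range(n):
--             v = grid[r][c]
--             if v != 0:
--                 grid[r][c] = 0
--                 if basket and basket[-1] == v:
--                     basket.pop()
--                     answer += 2
--                 else:
--                     basket.append(v)
--                 break
--     return answer
-- ===== Notes on version B (the rewrite author's own statement) =====
-- stated objective: simpler
-- what changed: B drops A's transpose-into-filtered-column-stacks preprocessing entirely: it works on a mutable copy of the board, and for each move scans that column top-down for the first non-zero cell, zeroes it and feeds it to the basket, instead of A's precomputed reversed column stacks with pop().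
-- outside the precondition, e.g. on solution([[1, 0, 1]], [1, 0]): A returns 0, B returns 2
import Mathlib
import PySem

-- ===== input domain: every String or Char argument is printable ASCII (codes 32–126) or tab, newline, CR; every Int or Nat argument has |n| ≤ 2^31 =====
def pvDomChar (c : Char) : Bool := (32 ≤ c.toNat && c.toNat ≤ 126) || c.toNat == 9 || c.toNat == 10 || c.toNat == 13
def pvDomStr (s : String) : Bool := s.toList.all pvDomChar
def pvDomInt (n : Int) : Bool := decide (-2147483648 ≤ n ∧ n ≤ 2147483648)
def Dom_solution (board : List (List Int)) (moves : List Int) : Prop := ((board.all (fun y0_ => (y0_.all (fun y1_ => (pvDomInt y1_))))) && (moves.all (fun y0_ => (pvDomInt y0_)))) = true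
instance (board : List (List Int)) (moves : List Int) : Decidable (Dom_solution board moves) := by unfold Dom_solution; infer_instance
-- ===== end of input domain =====

-- B replaces A's transpose into filtered per-column stacks by on-demand top-down scanning
-- of a copied board for the first non-zero cell of the moved column (objective: simpler).
-- Neither program mutates its arguments (A builds fresh stacks, B copies the board rows).

-- ===== PORT A =====
-- the two nested range-loops building game[i] = column i bottom-to-top, then the 0-filter
def initGame (board : List (List Int)) : List (List Int) :=
  (List.range board.length).map (fun i =>
    ((List.range board.length).map (fun (j : Nat) =>
      PySem.List.pyGetD (PySem.List.pyGetD board ((board.length : Int) - 1 - (j : Int)) []) ((i : Nat) : Int) 0)).filter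
      (fun x => !(x == 0)))

-- the body of A's 'for i in moves' loop; the basket rst is kept head-first (head = Python rst[-1])
def stepA (st : List (List Int) × List Int × Int) (i : Int) : List (List Int) × List Int × Int :=
  let col := PySem.List.pyGetD st.1 (i - 1) []
  match col.getLast? with
  | none => st
  | some t =>
    let game' := PySem.List.pySetD st.1 (i - 1) col.dropLast
    match st.2.1 with
    | r :: rs => if r == t then (game', rs, st.2.2 + 2) else (game', t :: r :: rs, st.2.2)
    | [] => (game', [t], st.2.2)

def solution (board : List (List Int)) (moves : List Int) : Int :=
  (moves.foldl stepA (initGame board, [], 0)).2.2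

-- ===== PORT B =====
-- B's inner 'for r in range(n): … break' loop: first row r with a non-zero cell in column c
def scanCol (grid : List (List Int)) (c : Int) : List Nat → Option (Nat × Int)
  | [] => none
  | r :: rs =>
    let v := PySem.List.pyGetD (grid.getD r []) c 0
    if v == 0 then scanCol grid c rs else some (r, v)

-- the body of B's 'for m in moves' loop; basket kept head-first (head = Python basket[-1])
def stepB (n : Nat) (st : List (List Int) × List Int × Int) (m : Int) : List (List Int) × List Int × Int :=
  match scanCol st.1 (m - 1) (List.range n) with
  | none => st
  | some (r, v) =>
    let grid' := st.1.set r (PySem.List.pySetD (st.1.getD r []) (m - 1) 0)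
    match st.2.1 with
    | b :: bs => if b == v then (grid', bs, st.2.2 + 2) else (grid', v :: b :: bs, st.2.2)
    | [] => (grid', [v], st.2.2)

def solution_alt (board : List (List Int)) (moves : List Int) : Int :=
  (moves.foldl (stepB board.length) (board.map (fun row => row), [], 0)).2.2

-- ===== PRECONDITION & SPEC =====
-- Pre_ requires rows at least as long as the board (A raises IndexError on shorter rows),
-- moves within Python's index range for the columns (A raises IndexError otherwise), and —
-- only when some move is ≤ 0 (a negative-index wraparound) — a exactly square board: on
-- overlong rows a wraparound move reads A's truncated transpose but B's full row, so
-- their values can differ there (see the cite).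
def Pre_solution (board : List (List Int)) (moves : List Int) : Prop :=
  (∀ row ∈ board, board.length ≤ row.length) ∧
  (∀ i ∈ moves, 1 - (board.length : Int) ≤ i ∧ i ≤ (board.length : Int)) ∧
  ((∃ i ∈ moves, i ≤ 0) → ∀ row ∈ board, row.length = board.length)
instance (board : List (List Int)) (moves : List Int) : Decidable (Pre_solution board moves) := by
  unfold Pre_solution; infer_instance

def pvWitness_solution : List (List Int) × List Int := ([[1, 0], [2, 3]], [1, 2, 0, 2])

def Spec_solution (board : List (List Int)) (moves : List Int) (out : Int) : Prop := out = solution_alt board moves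
instance (board : List (List Int)) (moves : List Int) (out : Int) : Decidable (Spec_solution board moves out) := by unfold Spec_solution; infer_instance

-- ===== CLAIM (what is proved, stated in full; the proofs are below) =====
def Claim_equal_solution : Prop := ∀ (board : List (List Int)) (moves : List Int), Dom_solution board moves → Pre_solution board moves → Spec_solution board moves (solution board moves)

-- ===== LEMMAS AND PROOFS =====

-- column k of the grid, top to bottom
def colList (grid : List (List Int)) (k : Nat) : List Int := grid.map (fun row => row.getD k 0)

-- first non-zero entry of a list, with its index
def firstNZ : List Int → Option (Nat × Int)
  | [] => none
  | x :: xs => if x == 0 then (firstNZ xs).map (fun p => (p.1 + 1, p.2)) else some (0, x)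

-- the simulation invariant: A's stack for column k is the reversed non-zero part of B's column k
def SimInv (n : Nat) (game grid : List (List Int)) : Prop :=
  game.length = n ∧ grid.length = n ∧ (∀ row ∈ grid, n ≤ row.length) ∧
  ∀ k, k < n → game.getD k [] = ((colList grid k).filter (fun x => !(x == 0))).reverse

theorem pyIdx_wrap (n : Nat) (i : Int) (h1 : 1 - (n : Int) ≤ i) (h2 : i ≤ (n : Int)) (hn : 0 < n) :
    ∃ w, PySem.List.pyIdx? n (i - 1) = some w ∧ w < n := by
  unfold PySem.List.pyIdx?
  split_ifs with ha hb hc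
  · exact ⟨(i - 1).toNat, rfl, by omega⟩
  · omega
  · exact ⟨n - (-(i - 1)).toNat, rfl, by omega⟩
  · omega

theorem pyGetD_of_idx {α : Type} (xs : List α) (i : Int) (d : α) (w : Nat)
    (h : PySem.List.pyIdx? xs.length i = some w) :
    PySem.List.pyGetD xs i d = xs.getD w d := by
  simp [PySem.List.pyGetD, PySem.List.pyGet?, h, List.getD_eq_getElem?_getD]

theorem pySetD_of_idx {α : Type} (xs : List α) (i : Int) (v : α) (w : Nat)
    (h : PySem.List.pyIdx? xs.length i = some w) :
    PySem.List.pySetD xs i v = xs.set w v := by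
  simp [PySem.List.pySetD, PySem.List.pySet?, h]

theorem colList_eq_map_range (grid : List (List Int)) (k : Nat) :
    colList grid k = (List.range grid.length).map (fun r => (grid.getD r []).getD k 0) := by
  apply List.ext_getElem
  · simp [colList]
  · intro r h1 h2
    simp only [colList, List.getElem_map, List.getElem_range]
    rw [List.getD_eq_getElem grid [] (by simpa [colList] using h1)]

theorem firstNZ_none (col : List Int) (h : firstNZ col = none) :
    col.filter (fun x => !(x == 0)) = [] := by
  induction col with
  | nil => rfl
  | cons x xs ih =>
    by_cases hx : x == 0
    · simp only [firstNZ, hx, if_pos, Option.map_eq_none_iff] at h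
      simp [hx, ih h]
    · simp [firstNZ, hx] at h

theorem firstNZ_some (col : List Int) : ∀ (j : Nat) (v : Int), firstNZ col = some (j, v) →
    j < col.length ∧
    col.filter (fun x => !(x == 0)) = v :: ((col.set j 0).filter (fun x => !(x == 0))) := by
  induction col with
  | nil => intro j v h; simp [firstNZ] at h
  | cons x xs ih =>
    intro j v h
    by_cases hx : x == 0
    · simp only [firstNZ, hx, if_pos] at h
      cases hfx : firstNZ xs with
      | none => rw [hfx] at h; simp at h
      | some p =>
        rw [hfx] at h
        simp only [Option.map_some, Option.some.injEq, Prod.mk.injEq] at h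
        obtain ⟨hj, hv⟩ := h
        have hih := ih p.1 p.2 (by rw [hfx])
        constructor
        · simp only [List.length_cons]; omega
        · have hx0 : x = 0 := by simpa using hx
          subst hx0
          have hjj : j = p.1 + 1 := by omega
          subst hjj
          rw [← hv]
          simp [hih.2]
    · simp only [firstNZ, hx, Bool.false_eq_true, if_false, Option.some.injEq, Prod.mk.injEq] at h
      obtain ⟨hj, hv⟩ := h
      subst hj; subst hv
      refine ⟨by simp, ?_⟩
      simp [hx]

theorem scanCol_eq (grid : List (List Int)) (c : Int) (w : Nat)
    (hrows : ∀ row ∈ grid, PySem.List.pyIdx? row.length c = some w ∧ w < row.length) :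
    ∀ (k s : Nat), s + k = grid.length →
      scanCol grid c (List.range' s k) =
        (firstNZ ((colList grid w).drop s)).map (fun p => (p.1 + s, p.2)) := by
  intro k
  induction k with
  | zero =>
    intro s hs
    have : (colList grid w).drop s = [] := by
      apply List.drop_eq_nil_of_le; simp [colList]; omega
    simp [scanCol, this, firstNZ]
  | succ k ih =>
    intro s hs
    have hslt : s < (colList grid w).length := by simp [colList]; omega
    have hsg : s < grid.length := by omega
    rw [List.drop_eq_getElem_cons hslt]
    have hmem : grid.getD s [] ∈ grid := by
      rw [List.getD_eq_getElem grid [] hsg]; exact List.getElem_mem hsg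
    obtain ⟨hidr, hwr⟩ := hrows _ hmem
    have hcell : PySem.List.pyGetD (grid.getD s []) c 0 = (colList grid w)[s] := by
      rw [pyGetD_of_idx (grid.getD s []) c 0 w hidr]
      simp only [colList, List.getElem_map]
      rw [List.getD_eq_getElem grid [] hsg]
    rw [List.range'_succ]
    show scanCol grid c (s :: List.range' (s + 1) k) = _
    simp only [scanCol]
    rw [hcell]
    by_cases hv : (colList grid w)[s] == 0
    · rw [if_pos hv, ih (s + 1) (by omega)]
      simp only [firstNZ, hv, if_pos]
      cases firstNZ ((colList grid w).drop (s + 1)) with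
      | none => rfl
      | some p =>
        simp only [Option.map_some, Option.some.injEq, Prod.mk.injEq]
        exact ⟨by omega, by trivial⟩
    · rw [if_neg hv]
      simp [firstNZ, hv]

theorem getD_set_self {α : Type} (l : List α) (w : Nat) (v d : α) (h : w < l.length) :
    (l.set w v).getD w d = v := by
  rw [List.getD_eq_getElem _ _ (by simpa using h)]
  simp

theorem getD_set_ne {α : Type} (l : List α) (w k : Nat) (v d : α) (h : k ≠ w) :
    (l.set w v).getD k d = l.getD k d := by
  simp [List.getD, List.getElem?_set_ne (by omega : w ≠ k)]

theorem dropLast_reverse_tail {α : Type} (l : List α) : l.reverse.dropLast = l.tail.reverse := by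
  cases l with
  | nil => rfl
  | cons x xs => simp [List.reverse_cons]

theorem colList_set (grid : List (List Int)) (r w k : Nat) (hr : r < grid.length)
    (hw : w < (grid.getD r []).length) :
    colList (grid.set r ((grid.getD r []).set w 0)) k =
      if k = w then (colList grid k).set r 0 else colList grid k := by
  simp only [colList, List.map_set]
  by_cases hkw : k = w
  · subst hkw
    rw [if_pos rfl, getD_set_self _ _ _ _ hw]
  · rw [if_neg hkw, getD_set_ne _ _ _ _ _ hkw]
    have hr' : r < (List.map (fun row => row.getD k 0) grid).length := by simpa using hr
    have hval : (grid.getD r []).getD k 0 = (List.map (fun row => row.getD k 0) grid)[r]'hr' := by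
      simp only [List.getElem_map]
      rw [List.getD_eq_getElem grid [] hr]
    rw [hval, List.set_getElem_self]

theorem step_eq (n : Nat) (i : Int) (hn : 0 < n) (h1 : 1 - (n : Int) ≤ i) (h2 : i ≤ (n : Int))
    (game grid : List (List Int)) (rst : List Int) (ans : Int)
    (hsq : i ≤ 0 → ∀ row ∈ grid, row.length = n) (hInv : SimInv n game grid) :
    SimInv n (stepA (game, rst, ans) i).1 (stepB n (grid, rst, ans) i).1 ∧
      (stepA (game, rst, ans) i).2 = (stepB n (grid, rst, ans) i).2 := by
  obtain ⟨hgl, hdl, hrows, hcols⟩ := hInv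
  obtain ⟨w, hidx, hw⟩ := pyIdx_wrap n (i - 1 + 1) (by omega) (by omega) hn
  rw [show i - 1 + 1 - 1 = i - 1 from by ring] at hidx
  have hrowIdx : ∀ row ∈ grid, PySem.List.pyIdx? row.length (i - 1) = some w ∧ w < row.length := by
    intro row hr
    by_cases hi : 1 ≤ i
    · have hlen := hrows row hr
      unfold PySem.List.pyIdx? at hidx ⊢
      rw [if_pos (by omega : (0 : Int) ≤ i - 1)] at hidx ⊢
      rw [if_pos (by omega : i - 1 < (n : Int))] at hidx
      rw [if_pos (by omega : i - 1 < (row.length : Int))]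
      exact ⟨hidx, by omega⟩
    · rw [hsq (by omega) row hr]
      exact ⟨hidx, by omega⟩
  have hcol : PySem.List.pyGetD game (i - 1) [] = ((colList grid w).filter (fun x => !(x == 0))).reverse := by
    rw [pyGetD_of_idx game (i - 1) [] w (by rw [hgl]; exact hidx), hcols w hw]
  have hscan : scanCol grid (i - 1) (List.range n) =
      (firstNZ (colList grid w)).map (fun p => (p.1 + 0, p.2)) := by
    rw [List.range_eq_range']
    have := scanCol_eq grid (i - 1) w hrowIdx n 0 (by omega)
    simpa [hdl] using this
  cases hF : firstNZ (colList grid w) with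
  | none =>
    have hfe := firstNZ_none _ hF
    have hscan0 : scanCol grid (i - 1) (List.range n) = none := by rw [hscan, hF]; rfl
    simp only [stepA, stepB, hcol, hfe, hscan0, List.reverse_nil, List.getLast?_nil]
    exact ⟨⟨hgl, hdl, hrows, hcols⟩, trivial⟩
  | some p =>
    obtain ⟨j, v⟩ := p
    obtain ⟨hjlt, hfil⟩ := firstNZ_some _ j v hF
    have hscan' : scanCol grid (i - 1) (List.range n) = some (j, v) := by
      rw [hscan, hF]; simp
    have hjn : j < n := by simpa [colList, hdl] using hjlt
    have hjmem : grid.getD j [] ∈ grid := by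
      rw [List.getD_eq_getElem grid [] (by omega)]
      exact List.getElem_mem (by omega)
    obtain ⟨hidxj, hwj⟩ := hrowIdx _ hjmem
    -- A side
    have hlast : (PySem.List.pyGetD game (i - 1) []).getLast? = some v := by
      rw [hcol, hfil, List.getLast?_reverse]; rfl
    have hdrop : (PySem.List.pyGetD game (i - 1) []).dropLast =
        (((colList grid w).set j 0).filter (fun x => !(x == 0))).reverse := by
      rw [hcol, hfil, dropLast_reverse_tail]; rfl
    have hsetA : PySem.List.pySetD game (i - 1) (PySem.List.pyGetD game (i - 1) []).dropLast =
        game.set w (((colList grid w).set j 0).filter (fun x => !(x == 0))).reverse := by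
      rw [pySetD_of_idx game (i - 1) _ w (by rw [hgl]; exact hidx), hdrop]
    -- B side
    have hsetB : PySem.List.pySetD (grid.getD j []) (i - 1) 0 = (grid.getD j []).set w 0 :=
      pySetD_of_idx _ _ _ w hidxj
    have hInv' : SimInv n (game.set w (((colList grid w).set j 0).filter (fun x => !(x == 0))).reverse)
        (grid.set j ((grid.getD j []).set w 0)) := by
      refine ⟨by simp [hgl], by simp [hdl], ?_, ?_⟩
      · intro row hrow
        rcases List.mem_or_eq_of_mem_set hrow with h | h
        · exact hrows row h
        · rw [h, List.length_set]; exact hrows _ hjmem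
      · intro k hk
        rw [colList_set grid j w k (by omega) hwj]
        by_cases hkw : k = w
        · subst hkw
          rw [if_pos rfl, getD_set_self _ _ _ _ (by omega)]
        · rw [if_neg hkw, getD_set_ne _ _ _ _ _ hkw]
          exact hcols k hk
    constructor
    · simp only [stepA, stepB, hlast, hscan', hsetA, hsetB]
      cases rst with
      | nil => exact hInv'
      | cons r rs =>
        by_cases hrv : r == v
        · simp only [hrv, if_pos]; exact hInv'
        · simp only [hrv, Bool.false_eq_true, if_false]; exact hInv'
    · simp only [stepA, stepB, hlast, hscan', hsetA, hsetB]
      cases rst with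
      | nil => rfl
      | cons r rs => by_cases hrv : r == v <;> simp [hrv]

-- B's step keeps every row's length: it only overwrites one cell of one row
theorem stepB_fst_rows (n : Nat) (grid : List (List Int)) (rst : List Int) (ans : Int)
    (i : Int) (L : Nat) (h : ∀ row ∈ grid, row.length = L) :
    ∀ row ∈ (stepB n (grid, rst, ans) i).1, row.length = L := by
  have key : ∀ r, ∀ row ∈ grid.set r (PySem.List.pySetD (grid.getD r []) (i - 1) 0), row.length = L := by
    intro r
    by_cases hrl : r < grid.length
    · intro row hr'
      rcases List.mem_or_eq_of_mem_set hr' with h1 | h1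
      · exact h row h1
      · rw [h1, PySem.List.length_pySetD]
        exact h _ (by rw [List.getD_eq_getElem grid [] hrl]; exact List.getElem_mem hrl)
    · rw [List.set_eq_of_length_le (by omega)]; exact h
  cases hs : scanCol grid (i - 1) (List.range n) with
  | none => simp only [stepB, hs]; exact h
  | some p =>
    obtain ⟨r, v⟩ := p
    simp only [stepB, hs]
    cases rst with
    | nil => exact key r
    | cons b bs =>
      by_cases hbv : b == v
      · simpa [hbv] using key r
      · simpa [hbv] using key r

theorem fold_eq (n : Nat) (hn : 0 < n) (moves : List Int)
    (hmv : ∀ i ∈ moves, 1 - (n : Int) ≤ i ∧ i ≤ (n : Int)) :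
    ∀ (game grid : List (List Int)) (rst : List Int) (ans : Int), SimInv n game grid →
      ((∃ i ∈ moves, i ≤ 0) → ∀ row ∈ grid, row.length = n) →
      (moves.foldl stepA (game, rst, ans)).2 = (moves.foldl (stepB n) (grid, rst, ans)).2 := by
  induction moves with
  | nil => intro game grid rst ans _ _; rfl
  | cons i ms ih =>
    intro game grid rst ans hInv hsqm
    obtain ⟨h1, h2⟩ := hmv i (List.mem_cons_self ..)
    obtain ⟨hInv', hpair⟩ := step_eq n i hn h1 h2 game grid rst ans
      (fun hi => hsqm ⟨i, List.mem_cons_self .., hi⟩) hInv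
    simp only [List.foldl_cons]
    have eA : stepA (game, rst, ans) i =
        ((stepA (game, rst, ans) i).1, (stepB n (grid, rst, ans) i).2.1, (stepB n (grid, rst, ans) i).2.2) := by
      rw [← hpair]
    have eB : stepB n (grid, rst, ans) i =
        ((stepB n (grid, rst, ans) i).1, (stepB n (grid, rst, ans) i).2.1, (stepB n (grid, rst, ans) i).2.2) := rfl
    rw [eA, eB]
    refine ih (fun j hj => hmv j (List.mem_cons_of_mem _ hj)) _ _ _ _ hInv' ?_
    intro hex
    exact stepB_fst_rows n grid rst ans i n
      (hsqm ⟨hex.choose, List.mem_cons_of_mem _ hex.choose_spec.1, hex.choose_spec.2⟩)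

theorem inv_init (board : List (List Int)) (hge : ∀ row ∈ board, board.length ≤ row.length) :
    SimInv board.length (initGame board) (board.map (fun row => row)) := by
  refine ⟨by simp [initGame], by simp, by simpa using hge, ?_⟩
  intro k hk
  unfold initGame
  rw [PySem.List.getD_map_range _ _ _ _ hk]
  have hmap : (List.range board.length).map (fun (j : Nat) =>
      PySem.List.pyGetD (PySem.List.pyGetD board ((board.length : Int) - 1 - (j : Int)) []) ((k : Nat) : Int) 0) =
      (List.range board.length).map (fun j => (board.getD (board.length - 1 - j) []).getD k 0) := by
    apply List.map_congr_left
    intro j hj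
    rw [List.mem_range] at hj
    rw [show ((board.length : Int) - 1 - (j : Int)) = ((board.length - 1 - j : Nat) : Int) from by omega]
    rw [PySem.List.pyGetD_natCast, PySem.List.pyGetD_natCast]
  rw [hmap]
  rw [show (board.map (fun row => row)) = board from by simp]
  rw [← List.filter_reverse]
  congr 1
  rw [colList_eq_map_range, ← List.map_reverse, List.range_eq_range', List.reverse_range',
    List.map_map, ← List.range_eq_range']
  apply List.map_congr_left
  intro j hj
  simp only [Function.comp_apply, Nat.zero_add]

-- ===== VERDICT (by name: the statement is the Claim_ definition above) =====
theorem solution_spec : Claim_equal_solution := by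
  intro board moves _ hPre
  obtain ⟨hge, hmv, hsqc⟩ := hPre
  unfold Spec_solution
  by_cases hn : board.length = 0
  · cases moves with
    | nil => simp [solution, solution_alt]
    | cons i ms =>
      obtain ⟨h1, h2⟩ := hmv i (List.mem_cons_self ..)
      rw [hn] at h1 h2
      omega
  · unfold solution solution_alt
    have := fold_eq board.length (by omega) moves hmv (initGame board)
      (board.map (fun row => row)) [] 0 (inv_init board hge)
      (fun hex row hr => hsqc hex row (by simpa using hr))
    exact congrArg Prod.snd this
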